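-- pv_equiv track=rewrite | github.com/Taltalite/transcaller | gen_data/basecall_chunk.py | parse_cigar_str
-- ===== SOURCE A (Python) =====
-- def parse_cigar_str(cigar_str):
--     # parse e.g. "10M1I5M" -> [(10,'M'), (1,'I'), (5,'M')]
--     ops = []
--     num = ''
--     for ch in cigar_str:
--         if ch.isdigit():
--             num += ch
--         else:
--             ops.append((int(num), ch))
--             num = ''
--     return ops
-- ===== SOURCE B (Python) =====
-- import re
--
-- def parse_cigar_str(cigar_str):
--     # regex tokenization: a (possibly empty) digit count and its op char per match;
--     # int of the empty count raises ValueError for a count-less op, trailing digits are dropped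
--     return [(int(n), op) for n, op in re.findall(r'(\d*)(\D)', cigar_str)]
-- ===== Notes on version B (the rewrite author's own statement) =====
-- stated objective: idiomatic
-- what changed: replaces the per-character digit-accumulation loop and manual flush state with a single regex scan re.findall(r'(\d*)(\D)') plus a comprehension
import Mathlib
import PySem

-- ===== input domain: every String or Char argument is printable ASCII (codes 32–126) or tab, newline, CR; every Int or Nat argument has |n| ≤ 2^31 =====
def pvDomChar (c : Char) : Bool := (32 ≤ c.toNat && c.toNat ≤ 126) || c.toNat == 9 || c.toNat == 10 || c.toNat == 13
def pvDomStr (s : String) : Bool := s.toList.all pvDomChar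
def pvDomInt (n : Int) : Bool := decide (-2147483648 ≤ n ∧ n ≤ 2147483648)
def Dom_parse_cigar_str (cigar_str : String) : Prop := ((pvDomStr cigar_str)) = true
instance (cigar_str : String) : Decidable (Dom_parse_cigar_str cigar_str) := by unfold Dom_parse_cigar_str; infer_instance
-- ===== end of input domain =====

set_option maxRecDepth 8192


-- B replaces A's per-character digit-accumulation loop with a regex-style tokenizing scan
-- (maximal digit run + following op char); idiomatic, same cost. Return values only.

-- ===== PORT A =====
-- literal port of A's loop: state = (ops accumulated so far, pending digit characters num).
-- int(num) is ported as (PySem.Int.ofChars? num).getD 0; the `none` case (empty num, ValueError)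
-- is exactly what Pre_parse_cigar_str excludes, so the default is never reached on Pre_.
def parse_cigar_str (cigar_str : String) : List (Int × String) :=
  (cigar_str.toList.foldl
    (fun (st : List (Int × String) × List Char) ch =>
      if PySem.Chars.isdigit ch then (st.1, st.2 ++ [ch])
      else (st.1 ++ [((PySem.Int.ofChars? st.2).getD 0, String.ofList [ch])], []))
    ([], [])).1

-- ===== PORT B =====
-- hand port of re.findall(r'(\d*)(\D)'): at each position the match takes the (possibly
-- empty) maximal digit run and the following char, which is necessarily a non-digit; a
-- trailing all-digit remainder matches nowhere and is dropped.  int of an empty count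
-- group (ValueError) is the `none` of ofChars?, excluded by Pre_parse_cigar_str.
-- `fuel` only makes the recursion structural (each step consumes at least one character,
-- so `fuel = length` is always enough); it changes no computed value.
def pvScanPairs : Nat → List Char → List (Int × String)
  | 0, _ => []
  | _ + 1, [] => []
  | fuel + 1, c :: t =>
    match (c :: t).dropWhile PySem.Chars.isdigit with
    | [] => []
    | op :: t' =>
      ((PySem.Int.ofChars? ((c :: t).takeWhile PySem.Chars.isdigit)).getD 0,
        String.ofList [op]) :: pvScanPairs fuel t'

def parse_cigar_str_alt (cigar_str : String) : List (Int × String) :=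
  pvScanPairs cigar_str.toList.length cigar_str.toList

-- ===== PRECONDITION & SPEC =====
-- Pre_ excludes exactly the strings on which A raises ValueError (int of an empty count when
-- an op character is not immediately preceded by a digit): every non-digit character must have a
-- digit just before it (so in particular the string cannot start with a non-digit).
def Pre_parse_cigar_str (cigar_str : String) : Prop :=
  ((cigar_str.toList.take 1).all PySem.Chars.isdigit = true) ∧
  ((cigar_str.toList.zip cigar_str.toList.tail).all
    (fun p => PySem.Chars.isdigit p.2 || PySem.Chars.isdigit p.1) = true)
instance (cigar_str : String) : Decidable (Pre_parse_cigar_str cigar_str) := by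
  unfold Pre_parse_cigar_str; infer_instance

def pvWitness_parse_cigar_str : String := "10M1I5M"

def Spec_parse_cigar_str (cigar_str : String) (out : List (Int × String)) : Prop :=
  out = parse_cigar_str_alt cigar_str
instance (cigar_str : String) (out : List (Int × String)) : Decidable (Spec_parse_cigar_str cigar_str out) := by
  unfold Spec_parse_cigar_str; infer_instance

-- ===== CLAIM (what is proved, stated in full; the proofs are below) =====
def Claim_equal_parse_cigar_str : Prop := ∀ (cigar_str : String), Dom_parse_cigar_str cigar_str → Pre_parse_cigar_str cigar_str → Spec_parse_cigar_str cigar_str (parse_cigar_str cigar_str)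

-- ===== LEMMAS AND PROOFS =====

-- A's loop written as structural recursion on the remaining characters.
def pvAAux (num : List Char) : List Char → List (Int × String)
  | [] => []
  | c :: t =>
    if PySem.Chars.isdigit c then pvAAux (num ++ [c]) t
    else ((PySem.Int.ofChars? num).getD 0, String.ofList [c]) :: pvAAux [] t

theorem pvFoldA (l : List Char) : ∀ (acc : List (Int × String)) (num : List Char),
    (l.foldl
      (fun (st : List (Int × String) × List Char) ch =>
        if PySem.Chars.isdigit ch then (st.1, st.2 ++ [ch])
        else (st.1 ++ [((PySem.Int.ofChars? st.2).getD 0, String.ofList [ch])], []))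
      (acc, num)).1 = acc ++ pvAAux num l := by
  induction l with
  | nil => intro acc num; simp [pvAAux]
  | cons c t ih =>
    intro acc num
    by_cases hc : PySem.Chars.isdigit c = true
    · simp [pvAAux, hc, ih]
    · simp only [List.foldl_cons, pvAAux]
      rw [if_neg hc, if_neg hc, ih]
      simp

theorem pvDigitsShift (ds : List Char) (hds : ∀ c ∈ ds, PySem.Chars.isdigit c = true) :
    ∀ (num t : List Char), pvAAux num (ds ++ t) = pvAAux (num ++ ds) t := by
  induction ds with
  | nil => intro num t; simp
  | cons d ds ih =>
    intro num t
    have hd : PySem.Chars.isdigit d = true := hds d (by simp)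
    simp only [List.cons_append, pvAAux, if_pos hd]
    rw [ih (fun c hc => hds c (by simp [hc]))]
    simp

theorem pvOpNotDigit (t t' : List Char) (op : Char)
    (h : t.dropWhile PySem.Chars.isdigit = op :: t') : PySem.Chars.isdigit op = false := by
  have hne : t.dropWhile PySem.Chars.isdigit ≠ [] := by simp [h]
  have hnd := List.head_dropWhile_not (l := t) (p := PySem.Chars.isdigit) hne
  have hh : (t.dropWhile PySem.Chars.isdigit).head hne = op := by simp [h]
  rw [hh] at hnd; simpa using hnd

theorem pvMainAux : ∀ (n : Nat) (l : List Char), l.length ≤ n →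
    (∀ c, l.head? = some c → PySem.Chars.isdigit c = true) →
    l.IsChain (fun a b => PySem.Chars.isdigit b = false → PySem.Chars.isdigit a = true) →
    pvAAux [] l = pvScanPairs n l := by
  intro n
  induction n with
  | zero =>
    intro l hl _ _
    have : l = [] := List.length_eq_zero_iff.mp (Nat.le_zero.mp hl)
    subst this; simp [pvAAux, pvScanPairs]
  | succ n ih =>
    intro l hl hhead hchain
    match l with
    | [] => simp [pvAAux, pvScanPairs]
    | c :: t =>
      have hc : PySem.Chars.isdigit c = true := hhead c rfl
      have hsplit : t = t.takeWhile PySem.Chars.isdigit ++ t.dropWhile PySem.Chars.isdigit :=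
        (List.takeWhile_append_dropWhile).symm
      have hlhs : pvAAux [] (c :: t)
          = pvAAux (c :: t.takeWhile PySem.Chars.isdigit) (t.dropWhile PySem.Chars.isdigit) := by
        rw [pvAAux, if_pos hc]
        conv_lhs => rw [hsplit]
        rw [pvDigitsShift _ (fun d hd => List.mem_takeWhile_imp hd)]
        simp
      cases hrest : t.dropWhile PySem.Chars.isdigit with
      | nil =>
        rw [hlhs, hrest]
        simp [pvScanPairs, hc, hrest, pvAAux]
      | cons op t' =>
        have hop : PySem.Chars.isdigit op = false := pvOpNotDigit t t' op hrest
        rw [hrest] at hsplit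
        have hlen : t'.length ≤ n := by
          have := congrArg List.length hsplit
          simp at this hl; omega
        have hchain2 : (op :: t').IsChain
            (fun a b => PySem.Chars.isdigit b = false → PySem.Chars.isdigit a = true) := by
          have h2 := hchain
          rw [hsplit, ← List.cons_append] at h2
          exact (List.isChain_append.mp h2).2.1
        have hhead' : ∀ d, t'.head? = some d → PySem.Chars.isdigit d = true := by
          intro d hd
          have hR := (List.isChain_cons.mp hchain2).1 d hd
          by_contra hne
          have := hR (by simpa using hne)
          rw [this] at hop; exact absurd hop (by simp)
        have hrec := ih t' hlen hhead' hchain2.tail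
        rw [hlhs, hrest, pvAAux, if_neg (by simp [hop]), hrec]
        simp [pvScanPairs, hc, hrest]

-- bridge: the Bool form of Pre_ gives the head condition and the chain condition
theorem pvPreHead (l : List Char) (h : (l.take 1).all PySem.Chars.isdigit = true) :
    ∀ c, l.head? = some c → PySem.Chars.isdigit c = true := by
  intro c hc
  cases l with
  | nil => simp at hc
  | cons a t => simp at h hc; subst hc; exact h

theorem pvPreChain : ∀ (l : List Char),
    (l.zip l.tail).all (fun p => PySem.Chars.isdigit p.2 || PySem.Chars.isdigit p.1) = true →
    l.IsChain (fun a b => PySem.Chars.isdigit b = false → PySem.Chars.isdigit a = true) := by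
  intro l
  induction l with
  | nil => intro _; simp
  | cons a t ih =>
    intro h
    cases t with
    | nil => simp
    | cons b t' =>
      simp only [List.tail_cons, List.zip_cons_cons, List.all_cons, Bool.and_eq_true] at h
      refine List.isChain_cons.mpr ⟨?_, ih ?_⟩
      · intro y hy hnb
        simp at hy; subst hy
        rcases Bool.or_eq_true_iff.mp h.1 with h1 | h1
        · rw [h1] at hnb; cases hnb
        · exact h1
      · simpa using h.2

-- ===== VERDICT (by name: the statement is the Claim_ definition above) =====
theorem parse_cigar_str_spec : Claim_equal_parse_cigar_str := by
  intro s _ hpre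
  unfold Spec_parse_cigar_str parse_cigar_str parse_cigar_str_alt
  rw [pvFoldA]
  simpa using pvMainAux s.toList.length s.toList le_rfl (pvPreHead _ hpre.1) (pvPreChain _ hpre.2)
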